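-- pv_equiv track=rewrite | github.com/Slipfaith/applauncher | applauncher/services/validation.py | is_unc_path
-- ===== SOURCE A (Python) =====
-- def is_unc_path(path_value: str) -> bool:
--     """Return True for UNC paths like \\\\server\\share\\folder."""
--     value = (path_value or "").strip()
--     if not value:
--         return False
--     normalized = value.replace("/", "\\")
--     if not normalized.startswith("\\\\"):
--         return False
--     tail = normalized[2:]
--     parts = [part for part in tail.split("\\") if part]
--     return len(parts) >= 2
-- ===== SOURCE B (Python) =====
-- def is_unc_path(path_value: str) -> bool:
--     """Return True for UNC paths like \\\\server\\share\\folder.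
--
--     Single-pass scan: after normalization, verify the leading '\\\\' and then
--     run a tiny state machine over the rest, counting nonempty segments and
--     stopping as soon as two are seen (no intermediate list is built).
--     """
--     s = (path_value or "").strip().replace("/", "\\")
--     if len(s) < 2 or s[0] != "\\" or s[1] != "\\":
--         return False
--     segs = 0
--     prev_sep = True
--     for ch in s[2:]:
--         if ch == "\\":
--             prev_sep = True
--         elif prev_sep:
--             segs += 1
--             if segs == 2:
--                 return True
--             prev_sep = False
--     return False
-- ===== Notes on version B (the rewrite author's own statement) =====
-- stated objective: faster
-- what changed: Replaces the split-into-list / filter / count-parts logic with a single character scan (a small state machine) over the normalized string that stops as soon as two nonempty segments are seen, building no intermediate list.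
import Mathlib
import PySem

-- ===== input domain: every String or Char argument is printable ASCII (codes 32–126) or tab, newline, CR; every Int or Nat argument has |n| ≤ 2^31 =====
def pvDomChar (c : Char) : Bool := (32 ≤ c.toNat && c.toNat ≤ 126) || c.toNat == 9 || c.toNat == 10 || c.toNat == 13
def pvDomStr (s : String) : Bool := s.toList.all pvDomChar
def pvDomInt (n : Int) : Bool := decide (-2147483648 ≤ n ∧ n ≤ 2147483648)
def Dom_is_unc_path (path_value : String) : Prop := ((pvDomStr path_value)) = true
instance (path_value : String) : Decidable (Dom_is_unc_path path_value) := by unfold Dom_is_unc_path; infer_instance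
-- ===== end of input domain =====

-- B replaces A's split/filter/count of segments by a one-pass early-exit state machine that builds no intermediate list.

-- ===== PORT A =====
def is_unc_path (path_value : String) : Bool :=
  let value := PySem.Chars.strip path_value.toList
  if value.isEmpty then false
  else
    let normalized := PySem.Chars.replace value ['/'] ['\\']
    if ¬ PySem.Chars.startswith normalized ['\\', '\\'] then false
    else
      let tail := PySem.List.slice normalized (some 2) none
      let parts := (PySem.Chars.splitOn tail ['\\']).filter (fun part => !part.isEmpty)
      decide (parts.length ≥ 2)

-- ===== PORT B =====
-- the for-loop of Source B with its (prev_sep, segs) state and early return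
def isUncScan : List Char → Bool → Nat → Bool
  | [], _, _ => false
  | c :: r, prevSep, segs =>
    if c = '\\' then isUncScan r true segs
    else if prevSep then
      if segs + 1 = 2 then true else isUncScan r false (segs + 1)
    else isUncScan r prevSep segs

def is_unc_path_alt (path_value : String) : Bool :=
  let s := PySem.Chars.replace (PySem.Chars.strip path_value.toList) ['/'] ['\\']
  match s with
  | '\\' :: '\\' :: rest => isUncScan rest true 0
  | _ => false

-- ===== PRECONDITION & SPEC =====
def Spec_is_unc_path (path_value : String) (out : Bool) : Prop := out = is_unc_path_alt path_value
instance (path_value : String) (out : Bool) : Decidable (Spec_is_unc_path path_value out) := by unfold Spec_is_unc_path; infer_instance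

-- ===== CLAIM (what is proved, stated in full; the proofs are below) =====
def Claim_equal_is_unc_path : Prop := ∀ (path_value : String), Dom_is_unc_path path_value → Spec_is_unc_path path_value (is_unc_path path_value)

-- ===== LEMMAS AND PROOFS =====

-- structural characterization of splitting on the single separator '\\'
def splitBS : List Char → List (List Char)
  | [] => [[]]
  | c :: r => if c = '\\' then [] :: splitBS r else (splitBS r).modifyHead (c :: ·)

lemma splitBS_ne_nil (l : List Char) : splitBS l ≠ [] := by
  cases l with
  | nil => simp [splitBS]
  | cons c r =>
    simp only [splitBS]
    split
    · simp
    · cases h : splitBS r with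
      | nil => exact absurd h (splitBS_ne_nil r)
      | cons a t => simp

lemma splitOn_go_eq (fuel : Nat) (l cur : List Char) (acc : List (List Char))
    (h : l.length < fuel) :
    PySem.Chars.splitOn.go ['\\'] fuel l cur acc
      = acc.reverse ++ (splitBS l).modifyHead (cur.reverse ++ ·) := by
  induction fuel generalizing l cur acc with
  | zero => omega
  | succ n ih =>
    cases l with
    | nil => simp [PySem.Chars.splitOn.go, splitBS]
    | cons c r =>
      simp only [PySem.Chars.splitOn.go, splitBS]
      by_cases hc : c = '\\'
      · have hp : List.isPrefixOf ['\\'] (c :: r) = true := by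
          simp [List.isPrefixOf, hc]
        rw [if_pos hp]
        simp only [List.length_cons] at h
        rw [show List.drop (['\\'].length) (c :: r) = r from rfl]
        rw [ih r [] (cur.reverse :: acc) (by omega)]
        simp [hc]
        cases splitBS r <;> simp
      · have hp : List.isPrefixOf ['\\'] (c :: r) = false := by
          simp [List.isPrefixOf]
          exact fun hh => absurd hh.symm hc
        rw [if_neg (by simp [hp])]
        simp only [List.length_cons] at h
        rw [ih r (c :: cur) acc (by omega)]
        rw [if_neg hc]
        cases hS : splitBS r with
        | nil => exact absurd hS (splitBS_ne_nil r)
        | cons a t => simp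

lemma splitOn_eq_splitBS (l : List Char) :
    PySem.Chars.splitOn l ['\\'] = splitBS l := by
  unfold PySem.Chars.splitOn
  rw [splitOn_go_eq (l.length + 1) l [] [] (by omega)]
  cases h : splitBS l with
  | nil => exact absurd h (splitBS_ne_nil l)
  | cons a t => simp

-- number of nonempty segments still ahead, given whether we sit at a segment boundary
def segRuns : List Char → Bool → Nat
  | [], _ => 0
  | c :: r, prevSep =>
    if c = '\\' then segRuns r true
    else if prevSep then 1 + segRuns r false
    else segRuns r false

lemma isUncScan_eq (l : List Char) : ∀ (prevSep : Bool) (segs : Nat), segs ≤ 1 →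
    isUncScan l prevSep segs = decide (2 ≤ segs + segRuns l prevSep) := by
  induction l with
  | nil =>
    intro prevSep segs hsegs
    simp only [isUncScan, segRuns]
    exact (decide_eq_false (by omega)).symm
  | cons c r ih =>
    intro prevSep segs hsegs
    by_cases hc : c = '\\'
    · simp only [isUncScan, segRuns, if_pos hc]
      exact ih true segs hsegs
    · cases prevSep with
      | false =>
        simp only [isUncScan, segRuns, if_neg hc, if_neg (by simp : ¬ (false = true))]
        exact ih false segs hsegs
      | true =>
        simp only [isUncScan, segRuns, if_neg hc]
        by_cases h2 : segs + 1 = 2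
        · rw [if_pos h2]
          have : 2 ≤ segs + (1 + segRuns r false) := by omega
          simp [this]
        · rw [if_neg h2, ih false (segs + 1) (by omega)]
          have h3 : (2 ≤ segs + 1 + segRuns r false) = (2 ≤ segs + (1 + segRuns r false)) := by
            simp only [eq_iff_iff]; omega
          simp [h3]

lemma filter_splitBS (l : List Char) :
    ((splitBS l).filter (fun part => !part.isEmpty)).length = segRuns l true
      ∧ ((splitBS l).tail.filter (fun part => !part.isEmpty)).length = segRuns l false := by
  induction l with
  | nil => simp [splitBS, segRuns]
  | cons c r ih =>
    by_cases hc : c = '\\'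
    · simp only [splitBS, segRuns, if_pos hc]
      refine ⟨?_, ?_⟩
      · simpa using ih.1
      · simpa using ih.1
    · simp only [splitBS, segRuns, if_neg hc]
      cases hS : splitBS r with
      | nil => exact absurd hS (splitBS_ne_nil r)
      | cons a t =>
        rw [hS] at ih
        simp only [List.modifyHead_cons, List.tail_cons] at *
        refine ⟨?_, by simpa using ih.2⟩
        have h1 : (List.filter (fun part => !part.isEmpty) ((c :: a) :: t)).length
            = 1 + (List.filter (fun part => !part.isEmpty) t).length := by
          rw [List.filter_cons_of_pos (by simp), List.length_cons]
          omega
        rw [h1, ih.2]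
        simp

lemma not_startswith_shape (l : List Char)
    (h : ¬ (∃ rest, l = '\\' :: '\\' :: rest)) :
    PySem.Chars.startswith l ['\\', '\\'] = false := by
  match l with
  | [] => simp [PySem.Chars.startswith, List.isPrefixOf]
  | [c] => simp [PySem.Chars.startswith, List.isPrefixOf]
  | c1 :: c2 :: r =>
    simp only [PySem.Chars.startswith, List.isPrefixOf]
    by_cases h1 : c1 = '\\'
    · by_cases h2 : c2 = '\\'
      · exact absurd ⟨r, by rw [h1, h2]⟩ h
      · simp; intro _ hh; exact absurd hh.symm h2
    · simp; intro hh; exact absurd hh.symm h1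

-- the two bodies agree once the shared normalized string is abstracted
lemma unc_main (n : List Char) :
    (if ¬ PySem.Chars.startswith n ['\\', '\\'] then false
     else decide (((PySem.Chars.splitOn (PySem.List.slice n (some 2) none) ['\\']).filter
        (fun part => !part.isEmpty)).length ≥ 2))
      = (match n with
         | '\\' :: '\\' :: rest => isUncScan rest true 0
         | _ => false) := by
  by_cases hsh : ∃ rest, n = '\\' :: '\\' :: rest
  · obtain ⟨rest, hrest⟩ := hsh
    subst hrest
    have hsw : PySem.Chars.startswith ('\\' :: '\\' :: rest) ['\\', '\\'] = true := by
      simp [PySem.Chars.startswith, List.isPrefixOf]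
    rw [hsw]
    show _ = isUncScan rest true 0
    have htail : PySem.List.slice ('\\' :: '\\' :: rest) (some 2) none = rest := by
      simp [PySem.List.slice_from]
    rw [htail, splitOn_eq_splitBS, isUncScan_eq rest true 0 (by omega)]
    rw [(filter_splitBS rest).1]
    rw [if_neg (show ¬¬true = true by simp)]
    simp [ge_iff_le]
  · rw [not_startswith_shape n hsh]
    rw [if_pos (by simp)]
    split
    · rename_i rest heq
      exact absurd ⟨heq, rfl⟩ hsh
    · rfl

lemma unc_main2 (v : List Char) :
    (if v.isEmpty then false
     else
       let normalized := PySem.Chars.replace v ['/'] ['\\']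
       if ¬ PySem.Chars.startswith normalized ['\\', '\\'] then false
       else
         let tail := PySem.List.slice normalized (some 2) none
         let parts := (PySem.Chars.splitOn tail ['\\']).filter (fun part => !part.isEmpty)
         decide (parts.length ≥ 2))
      = (match PySem.Chars.replace v ['/'] ['\\'] with
         | '\\' :: '\\' :: rest => isUncScan rest true 0
         | _ => false) := by
  by_cases hemp : v.isEmpty
  · have hv : v = [] := List.isEmpty_iff.mp hemp
    subst hv
    rfl
  · rw [if_neg hemp]
    exact unc_main (PySem.Chars.replace v ['/'] ['\\'])

-- ===== VERDICT (by name: the statement is the Claim_ definition above) =====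
theorem is_unc_path_spec : Claim_equal_is_unc_path := by
  intro path_value _
  unfold Spec_is_unc_path is_unc_path is_unc_path_alt
  exact unc_main2 (PySem.Chars.strip path_value.toList)
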